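-- pv_equiv track=rewrite | github.com/qqwsad5/WOA | backend/Meta.py | url_to_mid
-- ===== SOURCE A (Python) =====
-- ALPHABET = "0123456789abcdefghijklmnopqrstuvwxyzABCDEFGHIJKLMNOPQRSTUVWXYZ"
--
-- def _base62_decode(string, alphabet=ALPHABET):
--     base = len(alphabet)
--     strlen = len(string)
--     num = 0
--     idx = 0
--     for char in string:
--         power = (strlen - (idx + 1))
--         num += alphabet.index(char) * (base ** power)
--         idx += 1
--     return num
--
-- def url_to_mid(url):
--     url = str(url)[::-1]
--     size = len(url) // 4 if len(url) % 4 == 0 else len(url) // 4 + 1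
--     result = []
--     for i in range(size):
--         s = url[i * 4: (i + 1) * 4][::-1]
--         s = str(_base62_decode(str(s)))
--         s_len = len(s)
--         if i < size - 1 and s_len < 7: s = (7 - s_len) * '0' + s
--         result.append(s)
--     result.reverse()
--     return int(''.join(result))
-- ===== SOURCE B (Python) =====
-- ALPHABET = "0123456789abcdefghijklmnopqrstuvwxyzABCDEFGHIJKLMNOPQRSTUVWXYZ"
--
-- def _decode_chunk(chunk):
--     # Horner base-62 accumulation, decimal string of the value
--     num = 0
--     for ch in chunk:
--         num = num * 62 + ALPHABET.index(ch)
--     return str(num)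
--
-- def url_to_mid(url):
--     s = str(url)
--     head = len(s) % 4 or 4           # length of the leading group
--     pieces = [_decode_chunk(s[:head])]   # leading group, unpadded
--     rest = s[head:]
--     while rest:                      # consume 4-char groups left to right
--         d = _decode_chunk(rest[:4])
--         pieces.append('0' * (7 - len(d)) + d)
--         rest = rest[4:]
--     return int(''.join(pieces))
-- ===== Notes on version B (the rewrite author's own statement) =====
-- stated objective: simpler
-- what changed: B scans the original string left to right (leading short group first, then 4-char groups) with Horner base-62 accumulation, instead of A's two string reversals, per-character power recomputation (base**power) and final list reversal.
-- outside the precondition, e.g. on url_to_mid(''): A raises ValueError, B returns 0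
import Mathlib
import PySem

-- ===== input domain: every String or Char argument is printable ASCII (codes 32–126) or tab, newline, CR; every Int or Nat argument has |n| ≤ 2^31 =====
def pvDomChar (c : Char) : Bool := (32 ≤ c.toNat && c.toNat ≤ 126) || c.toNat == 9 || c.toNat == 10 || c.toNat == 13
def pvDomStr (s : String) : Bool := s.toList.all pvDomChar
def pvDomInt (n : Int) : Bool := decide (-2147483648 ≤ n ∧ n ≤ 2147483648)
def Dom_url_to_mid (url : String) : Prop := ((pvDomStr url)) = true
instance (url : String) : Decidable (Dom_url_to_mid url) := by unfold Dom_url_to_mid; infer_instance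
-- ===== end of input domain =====

-- B decodes the string left-to-right (leading short group first, then 4-char groups,
-- Horner accumulation) instead of A's double-reversal with recomputed powers: simpler.

def pyAlphabet : List Char := "0123456789abcdefghijklmnopqrstuvwxyzABCDEFGHIJKLMNOPQRSTUVWXYZ".toList

-- ===== PORT A =====
-- _base62_decode: num += alphabet.index(char) * base**power over (char, idx) pairs
def base62_decode (cs : List Char) : Int :=
  let strlen : Int := cs.length
  (cs.foldl (fun (p : Int × Int) c =>
      (p.1 + (((PySem.List.index? pyAlphabet c).getD 0 : Nat) : Int) * 62 ^ (strlen - (p.2 + 1)).toNat,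
       p.2 + 1)) (0, 0)).1

def url_to_mid (url : String) : Int :=
  let u : List Char := url.toList.reverse                    -- url = str(url)[::-1]
  let n : Int := u.length
  let size : Int := if PySem.Int.mod n 4 = 0 then PySem.Int.floordiv n 4
                    else PySem.Int.floordiv n 4 + 1
  let result : List (List Char) :=
    (PySem.List.pyRange 0 size 1).foldl (fun res i =>
      let s1 := (PySem.List.slice u (some (i * 4)) (some ((i + 1) * 4))).reverse
      let s2 := PySem.Int.toChars (base62_decode s1)
      let slen : Int := s2.length
      let s3 := if i < size - 1 ∧ slen < 7 then List.replicate (7 - slen).toNat '0' ++ s2 else s2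
      res ++ [s3]) []
  (PySem.Int.ofChars? result.reverse.flatten).getD 0         -- int(''.join(result))

-- ===== PORT B =====
-- _decode_chunk: Horner accumulation, then str(num)
def altDec (cs : List Char) : List Char :=
  PySem.Int.toChars (cs.foldl (fun num c =>
    num * 62 + (((PySem.List.index? pyAlphabet c).getD 0 : Nat) : Int)) 0)

-- while rest: decode rest[:4], pad to 7, move to rest[4:]  (structural on the list)
def altPieces : List Char → List (List Char)
  | [] => []
  | a :: b :: c :: d :: rest =>
      (let p := altDec [a, b, c, d]; List.replicate (7 - p.length) '0' ++ p) :: altPieces rest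
  | rest => [let p := altDec rest; List.replicate (7 - p.length) '0' ++ p]

def url_to_mid_alt (url : String) : Int :=
  let s := url.toList
  let head : Nat := if s.length % 4 = 0 then 4 else s.length % 4    -- len(s) % 4 or 4
  let pieces := altDec (s.take head) :: altPieces (s.drop head)
  (PySem.Int.ofChars? pieces.flatten).getD 0

-- ===== PRECONDITION & SPEC =====
-- Pre_ excludes inputs where Python A raises ValueError: the empty string (int(''))
-- and strings with a character outside ALPHABET (str.index).
def Pre_url_to_mid (url : String) : Prop :=
  url.toList ≠ [] ∧ url.toList.all (fun c => pyAlphabet.contains c) = true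
instance (url : String) : Decidable (Pre_url_to_mid url) := by unfold Pre_url_to_mid; infer_instance

def pvWitness_url_to_mid : String := "Abc123xyz"

def Spec_url_to_mid (url : String) (out : Int) : Prop := out = url_to_mid_alt url
instance (url : String) (out : Int) : Decidable (Spec_url_to_mid url out) := by unfold Spec_url_to_mid; infer_instance

-- ===== CLAIM (what is proved, stated in full; the proofs are below) =====
def Claim_equal_url_to_mid : Prop := ∀ (url : String), Dom_url_to_mid url → Pre_url_to_mid url → Spec_url_to_mid url (url_to_mid url)

-- ===== LEMMAS AND PROOFS =====

def hornerNum (cs : List Char) : Int :=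
  cs.foldl (fun num c =>
    num * 62 + (((PySem.List.index? pyAlphabet c).getD 0 : Nat) : Int)) 0

-- Horner with an arbitrary accumulator
theorem horner_init (l : List Char) (a : Int) :
    l.foldl (fun num c => num * 62 + (((PySem.List.index? pyAlphabet c).getD 0 : Nat) : Int)) a
      = a * 62 ^ l.length + hornerNum l := by
  induction l generalizing a with
  | nil => simp [hornerNum]
  | cons c l ih =>
      simp only [List.foldl_cons, hornerNum, List.length_cons]
      rw [ih, ih (0 * 62 + _)]
      ring

theorem horner_cons (c : Char) (l : List Char) :
    hornerNum (c :: l)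
      = (((PySem.List.index? pyAlphabet c).getD 0 : Nat) : Int) * 62 ^ l.length + hornerNum l := by
  show List.foldl _ (0 * 62 + _) l = _
  rw [horner_init]; ring

theorem decode_aux (l : List Char) (num i strlen : Int) (h : strlen = i + l.length) :
    (l.foldl (fun (p : Int × Int) c =>
        (p.1 + (((PySem.List.index? pyAlphabet c).getD 0 : Nat) : Int) * 62 ^ (strlen - (p.2 + 1)).toNat,
         p.2 + 1)) (num, i)).1 = num + hornerNum l := by
  induction l generalizing num i with
  | nil => simp [hornerNum]
  | cons c l ih =>
      simp only [List.foldl_cons]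
      rw [ih _ (i + 1) (by simp at h ⊢; omega)]
      have hp : (strlen - (i + 1)).toNat = l.length := by simp at h; omega
      rw [hp, horner_cons]; ring

theorem decode_eq (cs : List Char) : base62_decode cs = hornerNum cs := by
  unfold base62_decode
  rw [decode_aux cs 0 0 cs.length (by simp)]
  ring

-- ===== VERDICT (by name: the statement is the Claim_ definition above) =====
-- padded decoded chunk (B's non-leading piece)
def padded (cs : List Char) : List Char :=
  List.replicate (7 - (altDec cs).length) '0' ++ altDec cs

theorem altPieces_cons (rest : List Char) (h : rest ≠ []) :
    altPieces rest = padded (rest.take 4) :: altPieces (rest.drop 4) := by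
  match rest with
  | [] => simp at h
  | [a] => rfl
  | [a, b] => rfl
  | [a, b, c] => rfl
  | a :: b :: c :: d :: r => rfl

theorem altPieces_snoc (n : Nat) (l c4 : List Char) (hn : l.length = n) (hl : n % 4 = 0)
    (hc : c4.length = 4) : altPieces (l ++ c4) = altPieces l ++ [padded c4] := by
  induction n using Nat.strong_induction_on generalizing l with
  | _ n ih =>
    rcases eq_or_ne l [] with rfl | hne
    · rw [List.nil_append, altPieces_cons c4 (by intro h; simp [h] at hc)]
      rw [List.take_of_length_le (by omega), List.drop_eq_nil_of_le (by omega)]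
      rfl
    · have h4 : 4 ≤ l.length := by
        have : l.length ≠ 0 := by simpa using hne
        omega
      rw [altPieces_cons (l ++ c4) (by simp [hne]),
          List.take_append_of_le_length (by omega),
          List.drop_append_of_le_length (by omega),
          ih (l.drop 4).length (by simp; omega) (l.drop 4) rfl (by simp; omega),
          altPieces_cons l hne]
      simp

-- the chunked-piece list of B (url_to_mid_alt = int∘join of it)
def BL (s : List Char) : List (List Char) :=
  altDec (s.take (if s.length % 4 = 0 then 4 else s.length % 4)) ::
    altPieces (s.drop (if s.length % 4 = 0 then 4 else s.length % 4))

theorem alt_eq_BL (url : String) :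
    url_to_mid_alt url = (PySem.Int.ofChars? (BL url.toList).flatten).getD 0 := rfl

-- A-side abstractions
def sizeN (n : Nat) : Nat := (n + 3) / 4

def fA (u : List Char) (sz : Nat) (k : Nat) : List Char :=
  let s1 := (PySem.List.slice u (some ((k : Int) * 4)) (some (((k : Int) + 1) * 4))).reverse
  let s2 := PySem.Int.toChars (base62_decode s1)
  if k < sz - 1 ∧ s2.length < 7 then List.replicate (7 - s2.length) '0' ++ s2 else s2

def AL (s : List Char) : List (List Char) :=
  ((List.range (sizeN s.length)).map (fA s.reverse (sizeN s.length))).reverse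

theorem slice_chunk (u : List Char) (k : Nat) :
    PySem.List.slice u (some ((k : Int) * 4)) (some (((k : Int) + 1) * 4))
      = (u.drop (4 * k)).take 4 := by
  rw [PySem.List.slice_toNat (a := (k : Int) * 4) (b := ((k : Int) + 1) * 4) u
        (by positivity) (by positivity)]
  have h1 : ((k : Int) * 4).toNat = 4 * k := by omega
  have h2 : (((k : Int) + 1) * 4).toNat = 4 * k + 4 := by omega
  rw [h1, h2]
  congr 1
  omega

theorem foldl_append_map {α β : Type} (g : α → β) (xs : List α) (init : List β) :
    xs.foldl (fun res i => res ++ [g i]) init = init ++ xs.map g := by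
  induction xs generalizing init with
  | nil => simp
  | cons x xs ih => simp [ih]

theorem url_to_mid_eq_AL (url : String) :
    url_to_mid url = (PySem.Int.ofChars? (AL url.toList).flatten).getD 0 := by
  have hsz : (if PySem.Int.mod ((url.toList.reverse.length : Nat) : Int) 4 = 0 then
        PySem.Int.floordiv ((url.toList.reverse.length : Nat) : Int) 4
      else PySem.Int.floordiv ((url.toList.reverse.length : Nat) : Int) 4 + 1)
      = ((sizeN url.toList.length : Nat) : Int) := by
    simp [sizeN]; split <;> omega
  simp only [url_to_mid, AL, hsz]
  rw [PySem.List.pyRange_one, List.foldl_map, foldl_append_map]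
  simp only [List.nil_append, Int.sub_zero, Int.toNat_natCast]
  congr 1
  congr 1
  congr 1
  congr 1
  apply List.map_congr_left
  intro k hk
  simp only [List.mem_range] at hk
  simp only [Int.zero_add, fA]
  apply if_congr
  · omega
  · congr 1
    congr 1
    omega
  · rfl

theorem altDec_eq (cs : List Char) : altDec cs = PySem.Int.toChars (hornerNum cs) := rfl

theorem AL_eq_BL : ∀ (n : Nat) (s : List Char), s.length = n → s ≠ [] → AL s = BL s := by
  intro n
  induction n using Nat.strong_induction_on with
  | _ n ih =>
    intro s hn hne
    have hpos : 0 < s.length := List.length_pos_of_ne_nil hne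
    by_cases hle : s.length ≤ 4
    · -- single chunk
      have hsz1 : sizeN s.length = 1 := by unfold sizeN; omega
      have hhh : s.length ≤ (if s.length % 4 = 0 then 4 else s.length % 4) := by
        split <;> omega
      unfold AL BL
      rw [hsz1, List.take_of_length_le hhh, List.drop_eq_nil_of_le hhh]
      show [fA s.reverse 1 0] = [altDec s]
      congr 1
      unfold fA
      rw [slice_chunk]
      norm_num
      rw [List.take_of_length_le (by simp; omega), List.reverse_reverse, decode_eq, altDec_eq]
    · rw [Nat.not_le] at hle
      set t := s.take (s.length - 4) with ht
      set c4 := s.drop (s.length - 4) with hc4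
      have hs : s = t ++ c4 := (List.take_append_drop _ s).symm
      have htl : t.length = s.length - 4 := by rw [ht, List.length_take]; omega
      have hcl : c4.length = 4 := by rw [hc4, List.length_drop]; omega
      have htne : t ≠ [] := by
        intro h; rw [h] at htl; simp at htl; omega
      have hmod : s.length % 4 = t.length % 4 := by omega
      -- B side
      have hB : BL s = BL t ++ [padded c4] := by
        unfold BL
        rw [← hmod]
        set m := if s.length % 4 = 0 then 4 else s.length % 4 with hm
        have hm_le : m ≤ t.length := by rw [hm]; split <;> omega
        have h1 : s.take m = t.take m := by
          conv_lhs => rw [hs]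
          rw [List.take_append_of_le_length hm_le]
        have h2 : s.drop m = t.drop m ++ c4 := by
          conv_lhs => rw [hs]
          rw [List.drop_append_of_le_length hm_le]
        rw [h1, h2, altPieces_snoc (t.drop m).length _ c4 rfl
              (by simp only [List.length_drop, htl]; rw [hm]; split <;> omega) hcl]
        simp
      -- A side
      have hszs : sizeN s.length = sizeN t.length + 1 := by unfold sizeN; omega
      have hk1 : 1 ≤ sizeN t.length := by unfold sizeN; omega
      have hA : AL s = AL t ++ [padded c4] := by
        unfold AL
        rw [hszs, List.range_succ_eq_map]
        simp only [List.map_cons, List.map_map, List.reverse_cons]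
        congr 1
        · congr 1
          apply List.map_congr_left
          intro j hj
          simp only [List.mem_range] at hj
          simp only [Function.comp_apply, fA]
          rw [slice_chunk, slice_chunk]
          have hdrop : s.reverse.drop (4 * (j + 1)) = t.reverse.drop (4 * j) := by
            conv_lhs => rw [hs]
            rw [List.reverse_append,
                show 4 * (j + 1) = c4.reverse.length + 4 * j by simp [hcl]; ring,
                List.drop_append]
            simp [List.drop_eq_nil_of_le, hcl]
          rw [hdrop]
          apply if_congr (by omega) rfl rfl
        · show [fA s.reverse (sizeN t.length + 1) 0] = [padded c4]
          congr 1
          unfold fA padded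
          rw [slice_chunk]
          norm_num
          rw [show s.reverse.take 4 = c4.reverse by
                conv_lhs => rw [hs]
                rw [List.reverse_append, List.take_append_of_le_length (by simp [hcl]),
                    List.take_of_length_le (by simp [hcl])]]
          rw [List.reverse_reverse, decode_eq, ← altDec_eq]
          by_cases h7 : (altDec c4).length < 7
          · rw [if_pos ⟨by omega, h7⟩]
          · rw [if_neg (by intro h; exact h7 h.2),
                show 7 - (altDec c4).length = 0 by omega]
            simp
      rw [hA, hB, ih t.length (by omega) t rfl htne]

-- ===== final assembly =====
theorem url_to_mid_spec : Claim_equal_url_to_mid := by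
  intro url _hd hp
  unfold Spec_url_to_mid
  rw [url_to_mid_eq_AL, alt_eq_BL, AL_eq_BL url.toList.length url.toList rfl hp.1]
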